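-- pv_equiv track=rewrite | github.com/weiyangzen/awesome_algorithms | Algorithms/数学-数值分析-0440-有限元_-_p版本/demo.py | build_connectivity
-- ===== SOURCE A (Python) =====
-- def build_connectivity(nelems: int, p: int) -> list[list[int]]:
--     """构建全局自由度编号（相邻单元共享端点自由度）。"""
--     elem_dofs: list[list[int]] = []
--     next_dof = 0
--
--     for e in range(nelems):
--         local: list[int] = []
--         for i in range(p + 1):
--             if e > 0 and i == 0:
--                 gid = elem_dofs[e - 1][-1]
--             else:
--                 gid = next_dof
--                 next_dof += 1
--             local.append(gid)
--         elem_dofs.append(local)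
--
--     return elem_dofs
-- ===== SOURCE B (Python) =====
-- def build_connectivity(nelems: int, p: int) -> list[list[int]]:
--     """Closed form: element e's DOFs are e*p .. e*p+p (shared endpoints coincide)."""
--     return [[e * p + i for i in range(p + 1)] for e in range(nelems)]
-- ===== Notes on version B (the rewrite author's own statement) =====
-- stated objective: simpler
-- what changed: Replaces the running next_dof counter and the back-reference to the previous element's last entry by the closed form elem_dofs[e][i] = e*p + i, computed independently per element.
import Mathlib
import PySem

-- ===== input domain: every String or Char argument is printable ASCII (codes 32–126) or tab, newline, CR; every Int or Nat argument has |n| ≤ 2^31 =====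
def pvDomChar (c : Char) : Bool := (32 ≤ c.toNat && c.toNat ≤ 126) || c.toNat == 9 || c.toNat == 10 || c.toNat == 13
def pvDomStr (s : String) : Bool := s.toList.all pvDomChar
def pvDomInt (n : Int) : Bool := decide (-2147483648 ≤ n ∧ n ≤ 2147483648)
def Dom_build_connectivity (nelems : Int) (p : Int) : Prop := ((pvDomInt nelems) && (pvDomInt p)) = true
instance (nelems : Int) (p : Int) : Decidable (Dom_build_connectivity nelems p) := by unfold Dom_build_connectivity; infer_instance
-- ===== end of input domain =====

-- B replaces A's running counter and back-reference to the previous element by the closed form e*p + i (simpler).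

-- ===== PORT A =====
-- inner loop body: the 'gid = elem_dofs[e-1][-1]' access (Python would raise IndexError if out of
-- range, but that branch is only reached with e > 0 and p ≥ 0, where it is always in range; the
-- '.getD' defaults are therefore unreachable)
def pvInnerStep (prev : List (List Int)) (e : Int) (lc : List Int × Int) (i : Int) : List Int × Int :=
  if e > 0 ∧ i = 0 then
    (lc.1 ++ [(PySem.List.pyGet? ((PySem.List.pyGet? prev (e - 1)).getD []) (-1)).getD 0], lc.2)
  else
    (lc.1 ++ [lc.2], lc.2 + 1)

def pvOuterStep (p : Int) (st : List (List Int) × Int) (e : Int) : List (List Int) × Int :=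
  let r := (PySem.List.pyRange 0 (p + 1) 1).foldl (pvInnerStep st.1 e) ([], st.2)
  (st.1 ++ [r.1], r.2)

def build_connectivity (nelems : Int) (p : Int) : List (List Int) :=
  ((PySem.List.pyRange 0 nelems 1).foldl (pvOuterStep p) ([], 0)).1

-- ===== PORT B =====
def build_connectivity_alt (nelems : Int) (p : Int) : List (List Int) :=
  (PySem.List.pyRange 0 nelems 1).map (fun e =>
    (PySem.List.pyRange 0 (p + 1) 1).map (fun i => e * p + i))

-- ===== PRECONDITION & SPEC =====
def Spec_build_connectivity (nelems : Int) (p : Int) (out : List (List Int)) : Prop := out = build_connectivity_alt nelems p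
instance (nelems : Int) (p : Int) (out : List (List Int)) : Decidable (Spec_build_connectivity nelems p out) := by unfold Spec_build_connectivity; infer_instance

-- ===== CLAIM (what is proved, stated in full; the proofs are below) =====
def Claim_equal_build_connectivity : Prop := ∀ (nelems : Int) (p : Int), Dom_build_connectivity nelems p → Spec_build_connectivity nelems p (build_connectivity nelems p)

-- ===== LEMMAS AND PROOFS =====

-- B's row for element e
def pvRow (p e : Int) : List Int := (PySem.List.pyRange 0 (p + 1) 1).map (fun i => e * p + i)

-- inner fold when the guard never fires: consecutive counter values are appended
theorem pv_inner_no_guard (prev : List (List Int)) (e : Int) (L : List Int)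
    (h : ∀ i ∈ L, ¬(e > 0 ∧ i = 0)) (acc : List Int) (c : Int) :
    L.foldl (pvInnerStep prev e) (acc, c)
      = (acc ++ (List.range L.length).map (fun (k : Nat) => c + (k : Int)), c + (L.length : Int)) := by
  induction L generalizing acc c with
  | nil => simp
  | cons x xs ih =>
    have hx : ¬(e > 0 ∧ x = 0) := h x (List.mem_cons_self)
    have hxs : ∀ i ∈ xs, ¬(e > 0 ∧ i = 0) := fun i hi => h i (List.mem_cons_of_mem _ hi)
    simp only [List.foldl_cons, pvInnerStep]
    rw [if_neg hx, ih hxs]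
    simp only [Prod.mk.injEq, List.length_cons]
    constructor
    · rw [List.range_succ_eq_map, List.map_cons, List.map_map, List.append_assoc,
        List.singleton_append]
      congr 1
      congr 1
      · norm_num
      · apply List.map_congr_left
        intro k _
        simp only [Function.comp_apply]
        push_cast; ring
    · push_cast; ring

-- counting fold over range(p+1) starting fresh (element 0 and the tail of later elements)
theorem pv_mem_tail_ne_zero (p i : Int) (hi : i ∈ PySem.List.pyRange 1 (p + 1) 1) : ¬(i = 0) := by
  have := (PySem.List.mem_pyRange_one).1 hi
  omega

-- the last entry of B's row, needed for the shared-endpoint branch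
theorem pv_row_last (p e : Int) (hp : 0 ≤ p) :
    PySem.List.pyGet? (pvRow p e) (-1) = some (e * p + p) := by
  rw [PySem.List.pyGet?_neg_one, pvRow, PySem.List.pyRange_one]
  have h1 : (p + 1 - 0).toNat = p.toNat + 1 := by omega
  rw [h1, List.range_succ]
  simp [List.getLast?_append, hp]

-- row(e) written as head 'e*p' followed by counter values from e*p+1
theorem pv_row_decomp (p e : Int) (hp : 0 ≤ p) :
    pvRow p e = (e * p) :: (List.range p.toNat).map (fun (k : Nat) => e * p + 1 + (k : Int)) := by
  rw [pvRow, PySem.List.pyRange_one]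
  have h1 : (p + 1 - 0).toNat = p.toNat + 1 := by omega
  rw [h1, List.range_succ_eq_map]
  simp only [List.map_cons, List.map_map]
  congr 1
  · norm_num
  · apply List.map_congr_left
    intro k _
    simp only [Function.comp_apply]
    push_cast; ring

-- the invariant for p ≥ 0: after n elements the rows are B's rows and next_dof = n*p + min n 1
theorem pv_invariant (p : Int) (hp : 0 ≤ p) (n : Nat) :
    (PySem.List.pyRange 0 (n : Int) 1).foldl (pvOuterStep p) ([], 0)
      = ((PySem.List.pyRange 0 (n : Int) 1).map (pvRow p),
         (n : Int) * p + min (n : Int) 1) := by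
  induction n with
  | zero => simp [PySem.List.pyRange_one_eq_nil]
  | succ n ih =>
    have hsr : (PySem.List.pyRange 0 ((n : Int) + 1) 1)
        = PySem.List.pyRange 0 (n : Int) 1 ++ [(n : Int)] :=
      PySem.List.pyRange_one_succ_right (by omega)
    push_cast
    rw [hsr, List.foldl_append, ih, List.map_append]
    simp only [List.foldl_cons, List.foldl_nil, pvOuterStep]
    by_cases hn : n = 0
    · subst hn
      have hng : ∀ i ∈ PySem.List.pyRange 0 (p + 1) 1, ¬((0 : Int) > 0 ∧ i = 0) := by
        intro i _; simp
      push_cast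
      rw [pv_inner_no_guard _ _ _ hng]
      simp only [Prod.mk.injEq]
      constructor
      · simp only [PySem.List.pyRange_one_eq_nil (le_refl (0 : Int)), List.map_nil,
          List.nil_append, List.map_cons, List.map_nil]
        congr 1
        rw [pvRow, PySem.List.pyRange_one]
        simp only [List.map_map, List.length_map, List.length_range]
        apply List.map_congr_left
        intro k _
        simp only [Function.comp_apply]
        have hm : min (0 : Int) 1 = 0 := by norm_num
        rw [hm]
        ring
      · rw [PySem.List.length_pyRange_one]
        omega
    · have hnpos : (0 : Int) < (n : Int) := by positivity
      have hmin : min ((n : Int)) 1 = 1 := by omega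
      rw [hmin]
      -- split the inner range: first iteration takes the shared endpoint, rest counts
      have hro : PySem.List.pyRange 0 (p + 1) 1 = 0 :: PySem.List.pyRange 1 (p + 1) 1 :=
        PySem.List.pyRange_one_cons (by omega)
      rw [hro]
      simp only [List.foldl_cons, pvInnerStep, hnpos, and_true, if_pos]
      -- the previous row's last entry
      have hprev : PySem.List.pyGet? ((PySem.List.pyRange 0 (n : Int) 1).map (pvRow p)) ((n : Int) - 1)
          = some (pvRow p ((n : Int) - 1)) := by
        have h0 : (0 : Int) ≤ (n : Int) - 1 := by omega
        rw [PySem.List.pyGet?_of_nonneg _ h0]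
        have hlt : ((n : Int) - 1).toNat < n := by omega
        rw [PySem.List.getElem?_map_pyRange_zero _ _ _ (by exact_mod_cast hlt)]
        congr 1; congr 1; omega
      rw [hprev]
      simp only [Option.getD_some]
      rw [pv_row_last p _ hp]
      simp only [Option.getD_some]
      have hng : ∀ i ∈ PySem.List.pyRange 1 (p + 1) 1, ¬((n : Int) > 0 ∧ i = 0) := by
        intro i hi h0
        exact pv_mem_tail_ne_zero p i hi h0.2
      rw [pv_inner_no_guard _ _ _ hng]
      simp only [Prod.mk.injEq, List.map_cons, List.map_nil]
      have hlen : ((PySem.List.pyRange 1 (p + 1) 1).length : Int) = p := by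
        rw [PySem.List.length_pyRange_one]; omega
      have hlenN : (PySem.List.pyRange 1 (p + 1) 1).length = p.toNat := by
        rw [PySem.List.length_pyRange_one]; omega
      constructor
      · congr 1
        rw [pv_row_decomp p _ hp, hlenN]
        simp only [List.nil_append, List.cons_append]
        congr 1
        · ring
      · rw [hlen]
        rw [min_eq_right (by omega : (1 : Int) ≤ (n : Int) + 1)]
        ring

-- p < 0: every inner range is empty, every row is []
theorem pv_neg_fold (p : Int) (hp : p < 0) (L : List Int) (acc : List (List Int)) (c : Int) :
    L.foldl (pvOuterStep p) (acc, c) = (acc ++ L.map (fun _ => []), c) := by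
  induction L generalizing acc c with
  | nil => simp
  | cons x xs ih =>
    simp only [List.foldl_cons, pvOuterStep, PySem.List.pyRange_one_eq_nil (by omega : p + 1 ≤ 0),
      List.foldl_nil, List.map_cons]
    rw [ih]
    simp

-- ===== VERDICT (by name: the statement is the Claim_ definition above) =====
theorem build_connectivity_spec : Claim_equal_build_connectivity := by
  intro nelems p _
  unfold Spec_build_connectivity build_connectivity build_connectivity_alt
  by_cases hp : 0 ≤ p
  · have hr : PySem.List.pyRange 0 nelems 1 = PySem.List.pyRange 0 (nelems.toNat : Int) 1 := by
      by_cases hn : 0 ≤ nelems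
      · congr 1; omega
      · rw [PySem.List.pyRange_one_eq_nil (by omega), PySem.List.pyRange_one_eq_nil (by omega)]
    rw [hr, pv_invariant p hp nelems.toNat]
    rfl
  · rw [pv_neg_fold p (by omega)]
    simp [PySem.List.pyRange_one_eq_nil (by omega : p + 1 ≤ 0)]
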